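-- pv_equiv track=rewrite | github.com/hansie4/hans-aoc | 2023/Day 22/main.py | whatBlocksBreakByRemovingBlock
-- ===== SOURCE A (Python) =====
-- def whatBlocksBreakByRemovingBlock(blockToRemove: int, supports: dict, removed: set()):
--     blockIsSupporting = supports[blockToRemove]
--
--     blocksOthersSupport = set()
--
--     for s in supports:
--         if s != blockToRemove and s not in removed:
--             for p in supports[s]:
--                 if p in blockIsSupporting:
--                     blocksOthersSupport.add(p)
--
--     return blockIsSupporting.difference(blocksOthersSupport)
-- ===== SOURCE B (Python) =====
-- def whatBlocksBreakByRemovingBlock(blockToRemove: int, supports: dict, removed: set()):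
--     # Candidate-first search: for each block the removed one supports, scan for
--     # any *other* live supporter (early exit); no global covered-set is built.
--     def hasOtherSupporter(p):
--         return any(p in ps
--                    for s, ps in supports.items()
--                    if s != blockToRemove and s not in removed)
--     return {p for p in supports[blockToRemove] if not hasOtherSupporter(p)}
-- ===== Notes on version B (the rewrite author's own statement) =====
-- stated objective: simpler
-- what changed: B searches candidate-first: for each block in supports[blockToRemove] it runs an any() existential scan with early exit over the other live supporters, instead of A's single global pass that accumulates a membership-filtered covered set and then takes a set difference.
import Mathlib
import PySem

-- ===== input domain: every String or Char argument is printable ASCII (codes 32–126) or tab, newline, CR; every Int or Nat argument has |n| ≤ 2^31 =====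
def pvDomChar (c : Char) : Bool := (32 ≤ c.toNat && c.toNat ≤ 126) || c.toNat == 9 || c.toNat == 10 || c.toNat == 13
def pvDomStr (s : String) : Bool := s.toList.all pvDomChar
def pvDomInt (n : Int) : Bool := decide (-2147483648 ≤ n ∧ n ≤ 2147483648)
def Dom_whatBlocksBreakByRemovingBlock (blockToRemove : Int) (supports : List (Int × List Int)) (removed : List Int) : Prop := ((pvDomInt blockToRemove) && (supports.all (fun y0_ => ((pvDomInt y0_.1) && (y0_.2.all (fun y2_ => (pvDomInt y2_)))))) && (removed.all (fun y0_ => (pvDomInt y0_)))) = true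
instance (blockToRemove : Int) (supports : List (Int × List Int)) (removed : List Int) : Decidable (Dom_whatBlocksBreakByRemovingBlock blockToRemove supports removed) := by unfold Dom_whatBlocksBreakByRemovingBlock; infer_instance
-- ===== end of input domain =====

-- B searches candidate-first with an existential early-exit scan per candidate,
-- instead of A's global covered-set accumulation followed by a set difference (simpler shape, not faster).

-- ===== PORT A =====
def whatBlocksBreakByRemovingBlock (blockToRemove : Int) (supports : List (Int × List Int)) (removed : List Int) : List Int :=
  match PySem.Dict.get? ⟨supports⟩ blockToRemove with
  | none => []  -- unreachable under Pre_ (Python raises KeyError)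
  | some blockIsSupporting =>
    let blocksOthersSupport : PySem.Set Int :=
      supports.foldl (fun acc sp =>
        if sp.1 ≠ blockToRemove ∧ sp.1 ∉ removed then
          sp.2.foldl (fun a p => if p ∈ blockIsSupporting then PySem.Set.add a p else a) acc
        else acc) PySem.Set.empty
    blockIsSupporting.filter (fun p => p ∉ blocksOthersSupport)

-- ===== PORT B =====
def whatBlocksBreakByRemovingBlock_alt (blockToRemove : Int) (supports : List (Int × List Int)) (removed : List Int) : List Int :=
  -- hasOtherSupporter p = any(p in ps for s, ps in supports.items() if s != blockToRemove and s not in removed)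
  let hasOtherSupporter : Int → Bool := fun p =>
    supports.any (fun sp => decide (sp.1 ≠ blockToRemove ∧ sp.1 ∉ removed) && decide (p ∈ sp.2))
  match PySem.Dict.get? ⟨supports⟩ blockToRemove with
  | none => []  -- unreachable under Pre_ (Python raises KeyError)
  | some cand => cand.filter (fun p => !hasOtherSupporter p)

-- ===== PRECONDITION & SPEC =====
-- Pre_ excludes exactly the inputs where Python A raises KeyError: blockToRemove not a key of supports.
def Pre_whatBlocksBreakByRemovingBlock (blockToRemove : Int) (supports : List (Int × List Int)) (removed : List Int) : Prop :=
  blockToRemove ∈ supports.map (·.1)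
instance (blockToRemove : Int) (supports : List (Int × List Int)) (removed : List Int) : Decidable (Pre_whatBlocksBreakByRemovingBlock blockToRemove supports removed) := by unfold Pre_whatBlocksBreakByRemovingBlock; infer_instance

def pvWitness_whatBlocksBreakByRemovingBlock : Int × (List (Int × List Int)) × List Int :=
  (1, [(1, [2, 3]), (2, [3])], [5])

def Spec_whatBlocksBreakByRemovingBlock (blockToRemove : Int) (supports : List (Int × List Int)) (removed : List Int) (out : List Int) : Prop := out = whatBlocksBreakByRemovingBlock_alt blockToRemove supports removed
instance (blockToRemove : Int) (supports : List (Int × List Int)) (removed : List Int) (out : List Int) : Decidable (Spec_whatBlocksBreakByRemovingBlock blockToRemove supports removed out) := by unfold Spec_whatBlocksBreakByRemovingBlock; infer_instance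

-- ===== CLAIM (what is proved, stated in full; the proofs are below) =====
def Claim_equal_whatBlocksBreakByRemovingBlock : Prop := ∀ (blockToRemove : Int) (supports : List (Int × List Int)) (removed : List Int), Dom_whatBlocksBreakByRemovingBlock blockToRemove supports removed → Pre_whatBlocksBreakByRemovingBlock blockToRemove supports removed → Spec_whatBlocksBreakByRemovingBlock blockToRemove supports removed (whatBlocksBreakByRemovingBlock blockToRemove supports removed)

-- ===== LEMMAS AND PROOFS =====

-- A-side inner loop: membership in the accumulated set.
lemma memInner (bis ps acc : List Int) (p : Int) :
    p ∈ ps.foldl (fun a q => if q ∈ bis then PySem.Set.add a q else a) acc ↔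
      p ∈ acc ∨ (p ∈ ps ∧ p ∈ bis) := by
  induction ps generalizing acc with
  | nil => simp
  | cons q ps ih =>
    simp only [List.foldl_cons, ih]
    by_cases hq : q ∈ bis
    · simp [hq, PySem.Set.mem_add]
      constructor
      · rintro ((h | rfl) | h)
        · exact Or.inl h
        · exact Or.inr ⟨Or.inl rfl, hq⟩
        · exact Or.inr ⟨Or.inr h.1, h.2⟩
      · rintro (h | ⟨(rfl | h), hb⟩)
        · exact Or.inl (Or.inl h)
        · exact Or.inl (Or.inr rfl)
        · exact Or.inr ⟨h, hb⟩
    · simp [hq]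
      constructor
      · rintro (h | h)
        · exact Or.inl h
        · exact Or.inr ⟨Or.inr h.1, h.2⟩
      · rintro (h | ⟨(rfl | h), hb⟩)
        · exact Or.inl h
        · exact (hq hb).elim
        · exact Or.inr ⟨h, hb⟩

-- A-side outer loop: membership characterisation.
lemma memOuter (b : Int) (removed bis : List Int) (l : List (Int × List Int))
    (acc : PySem.Set Int) (p : Int) :
    p ∈ l.foldl (fun acc sp =>
        if sp.1 ≠ b ∧ sp.1 ∉ removed then
          sp.2.foldl (fun a q => if q ∈ bis then PySem.Set.add a q else a) acc
        else acc) acc ↔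
      p ∈ acc ∨ ∃ sp ∈ l, (sp.1 ≠ b ∧ sp.1 ∉ removed) ∧ p ∈ sp.2 ∧ p ∈ bis := by
  induction l generalizing acc with
  | nil => simp
  | cons sp l ih =>
    simp only [List.foldl_cons]
    by_cases hc : sp.1 ≠ b ∧ sp.1 ∉ removed
    · rw [if_pos hc, ih, memInner]
      constructor
      · rintro ((h | h) | ⟨t, ht, hct, hp⟩)
        · exact Or.inl h
        · exact Or.inr ⟨sp, List.mem_cons_self, hc, h⟩
        · exact Or.inr ⟨t, List.mem_cons_of_mem _ ht, hct, hp⟩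
      · rintro (h | ⟨t, ht, hct, hp⟩)
        · exact Or.inl (Or.inl h)
        · rcases List.mem_cons.mp ht with rfl | ht
          · exact Or.inl (Or.inr hp)
          · exact Or.inr ⟨t, ht, hct, hp⟩
    · rw [if_neg hc, ih]
      constructor
      · rintro (h | ⟨t, ht, hct, hp⟩)
        · exact Or.inl h
        · exact Or.inr ⟨t, List.mem_cons_of_mem _ ht, hct, hp⟩
      · rintro (h | ⟨t, ht, hct, hp⟩)
        · exact Or.inl h
        · rcases List.mem_cons.mp ht with rfl | ht
          · exact (hc hct).elim
          · exact Or.inr ⟨t, ht, hct, hp⟩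

-- Pointwise agreement of the two filter predicates on candidates.
lemma predAgree (b : Int) (supports : List (Int × List Int)) (removed bis : List Int) (p : Int)
    (hp : p ∈ bis) :
    (p ∉ (supports.foldl (fun acc sp =>
        if sp.1 ≠ b ∧ sp.1 ∉ removed then
          sp.2.foldl (fun a q => if q ∈ bis then PySem.Set.add a q else a) acc
        else acc) PySem.Set.empty : PySem.Set Int)) ↔
    (!(supports.any (fun sp => decide (sp.1 ≠ b ∧ sp.1 ∉ removed) && decide (p ∈ sp.2)))) = true := by
  rw [memOuter]
  simp only [Bool.not_eq_true', List.any_eq_false, Bool.and_eq_true, decide_eq_true_iff,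
    PySem.Set.empty]
  constructor
  · intro h sp hsp ⟨hc, hm⟩
    exact h (Or.inr ⟨sp, hsp, hc, hm, hp⟩)
  · rintro h (habs | ⟨sp, hsp, hc, hm, _⟩)
    · simp at habs
    · exact h sp hsp ⟨hc, hm⟩

-- ===== VERDICT (by name: the statement is the Claim_ definition above) =====
theorem whatBlocksBreakByRemovingBlock_spec : Claim_equal_whatBlocksBreakByRemovingBlock := by
  intro b supports removed _hdom _hpre
  unfold Spec_whatBlocksBreakByRemovingBlock
  unfold whatBlocksBreakByRemovingBlock whatBlocksBreakByRemovingBlock_alt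
  cases hget : PySem.Dict.get? ⟨supports⟩ b with
  | none => rfl
  | some bis =>
    simp only []
    apply List.filter_congr
    intro p hp
    have h := predAgree b supports removed bis p hp
    cases hq : (!(supports.any (fun sp => decide (sp.1 ≠ b ∧ sp.1 ∉ removed) && decide (p ∈ sp.2)))) with
    | true =>
      simp only [hq, iff_true] at h
      simpa [PySem.Set.empty] using h
    | false =>
      simp only [hq, Bool.false_eq_true, iff_false, not_not] at h
      simpa [PySem.Set.empty] using h
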